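-- pv_equiv track=rewrite | github.com/akhandsingh17/assignments | boilerplates/UniqueNumber.py | uniqueNumber
-- ===== SOURCE A (Python) =====
-- def uniqueNumber(num):
--     """
--     check if the given integer number if comprised of unique digits
--     :param num:
--     :return: Ture or Flase
--     """
--     dct = {}
--     key = 0
--     while num != 0:
--         key = num % 10
--         if key in dct.keys():
--             return False
--         else:
--             dct[key] = 1
--         num = int(num/10)
--     return True
-- ===== SOURCE B (Python) =====
-- def uniqueNumber(num):
--     digits = []
--     while num != 0:
--         digits.append(num % 10)
--         num = int(num / 10)
--     return len(set(digits)) == len(digits)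
-- ===== Notes on version B (the rewrite author's own statement) =====
-- stated objective: simpler
-- what changed: Two-phase structure: collect all extracted digits into a list first, then decide uniqueness once by comparing len(set(digits)) with len(digits), instead of an incremental dict membership check with early return inside the loop.
import Mathlib
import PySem

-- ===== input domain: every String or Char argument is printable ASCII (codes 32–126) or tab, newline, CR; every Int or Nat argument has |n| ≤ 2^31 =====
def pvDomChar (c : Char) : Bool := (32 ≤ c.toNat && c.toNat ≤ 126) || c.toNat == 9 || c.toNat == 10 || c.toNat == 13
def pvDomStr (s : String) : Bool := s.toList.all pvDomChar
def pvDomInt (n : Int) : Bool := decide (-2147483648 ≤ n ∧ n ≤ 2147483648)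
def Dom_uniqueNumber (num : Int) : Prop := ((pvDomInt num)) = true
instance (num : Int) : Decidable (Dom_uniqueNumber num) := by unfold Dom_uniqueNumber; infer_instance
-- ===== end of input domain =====

-- B collects the digit list first and decides uniqueness once via len(set(digits)) == len(digits),
-- replacing A's incremental dict-membership loop with early return; objective: simpler (not faster).
-- Both keep A's extraction: key = num % 10 (Python floor mod) and num = int(num/10); on |num| ≤ 2^31 the
-- float division int(num/10) is exactly truncation toward zero, ported as Int.tdiv.

-- termination helper cited by both ports' recursion
theorem pvTdivTenLt (num : Int) (h : num ≠ 0) : (num.tdiv 10).natAbs < num.natAbs := by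
  rw [Int.natAbs_tdiv]
  exact Nat.div_lt_self (by omega) (by norm_num)

-- ===== PORT A =====
def uniqueNumberLoop (num : Int) (dct : PySem.Dict Int Int) : Bool :=
  if h : num = 0 then true
  else
    let key := PySem.Int.mod num 10
    if (PySem.Dict.keys dct).contains key then false
    else uniqueNumberLoop (num.tdiv 10) (dct.insert key 1)
termination_by num.natAbs
decreasing_by exact pvTdivTenLt num h

def uniqueNumber (num : Int) : Bool := uniqueNumberLoop num PySem.Dict.empty

-- ===== PORT B =====
def collectDigits (num : Int) (digits : List Int) : List Int :=
  if h : num = 0 then digits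
  else collectDigits (num.tdiv 10) (digits ++ [PySem.Int.mod num 10])
termination_by num.natAbs
decreasing_by exact pvTdivTenLt num h

def uniqueNumber_alt (num : Int) : Bool :=
  let digits := collectDigits num []
  PySem.Set.len (PySem.Set.ofList digits) == (digits.length : Int)

-- ===== PRECONDITION & SPEC =====
def Spec_uniqueNumber (num : Int) (out : Bool) : Prop := out = uniqueNumber_alt num
instance (num : Int) (out : Bool) : Decidable (Spec_uniqueNumber num out) := by unfold Spec_uniqueNumber; infer_instance

-- ===== CLAIM (what is proved, stated in full; the proofs are below) =====
def Claim_equal_uniqueNumber : Prop := ∀ (num : Int), Dom_uniqueNumber num → Spec_uniqueNumber num (uniqueNumber num)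

-- ===== LEMMAS AND PROOFS =====

-- proof-side digit list (cons form)
def dL (num : Int) : List Int :=
  if h : num = 0 then []
  else PySem.Int.mod num 10 :: dL (num.tdiv 10)
termination_by num.natAbs
decreasing_by exact pvTdivTenLt num h

theorem collectDigits_eq (num : Int) (acc : List Int) :
    collectDigits num acc = acc ++ dL num := by
  fun_induction collectDigits num acc
  · simp_all [dL]
  · rename_i ih
    rw [ih]
    conv_rhs => rw [dL]
    simp_all

theorem loopA_char (num : Int) (dct : PySem.Dict Int Int) :
    uniqueNumberLoop num dct
      = decide ((dL num).Nodup ∧ ∀ k ∈ dL num, dct.contains k = false) := by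
  fun_induction uniqueNumberLoop num dct
  · simp_all [dL]
  · rename_i n d h key hmem
    conv_rhs => rw [dL]
    simp only [h, dite_false]
    rw [List.contains_iff_mem] at hmem
    have hk : d.contains (PySem.Int.mod n 10) = true := by
      rw [PySem.Dict.contains_iff_mem_keys]
      exact hmem
    symm
    rw [decide_eq_false_iff_not]
    rintro ⟨-, hall⟩
    have := hall _ List.mem_cons_self
    rw [hk] at this
    exact Bool.true_eq_false.mp this
  · rename_i n d h key hmem ih
    rw [ih]
    conv_rhs => rw [dL]
    simp only [h, dite_false]
    simp only [List.contains_iff_mem] at hmem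
    congr 1
    simp only [List.nodup_cons, List.mem_cons, eq_iff_iff]
    constructor
    · rintro ⟨hnd, hall⟩
      refine ⟨⟨?_, hnd⟩, ?_⟩
      · intro hin
        have := hall _ hin
        rw [PySem.Dict.contains_insert] at this
        simp only [Bool.or_eq_false_iff, beq_eq_false_iff_ne, ne_eq] at this
        exact this.1 rfl
      · rintro k (rfl | hkmem)
        · rw [← Bool.not_eq_true, PySem.Dict.contains_iff_mem_keys]
          exact hmem
        · have := hall k hkmem
          rw [PySem.Dict.contains_insert] at this
          simp only [Bool.or_eq_false_iff, beq_eq_false_iff_ne, ne_eq] at this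
          exact this.2
    · rintro ⟨⟨hnotin, hnd⟩, hall⟩
      refine ⟨hnd, fun k hkmem => ?_⟩
      rw [PySem.Dict.contains_insert]
      have hne : k ≠ PySem.Int.mod n 10 := fun hkk => hnotin (hkk ▸ hkmem)
      simp only [Bool.or_eq_false_iff, beq_eq_false_iff_ne, ne_eq]
      exact ⟨hne, hall k (Or.inr hkmem)⟩

theorem ofList_len_eq_iff (xs : List Int) :
    (PySem.Set.ofList xs).length = xs.length ↔ xs.Nodup := by
  induction xs with
  | nil => simp [PySem.Set.ofList_nil]
  | cons x xs ih =>
      rw [PySem.Set.ofList_cons]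
      by_cases hx : x ∈ xs
      · have hx' : x ∈ PySem.Set.ofList xs := (PySem.Set.mem_ofList xs x).mpr hx
        have hlt : (PySem.Set.discard (PySem.Set.ofList xs) x).length
            < (PySem.Set.ofList xs).length := by
          unfold PySem.Set.discard
          apply List.length_filter_lt_length_iff_exists.mpr
          exact ⟨x, hx', by simp⟩
        have hle := PySem.Set.length_ofList_le (xs := xs)
        constructor
        · intro hlen; exfalso; simp only [List.length_cons] at hlen; omega
        · intro hnd; exact absurd hx (by simp at hnd; exact hnd.1)
      · have heq : PySem.Set.discard (PySem.Set.ofList xs) x = PySem.Set.ofList xs := by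
          unfold PySem.Set.discard
          apply List.filter_eq_self.mpr
          intro y hy
          have : y ∈ xs := (PySem.Set.mem_ofList xs y).mp hy
          have : y ≠ x := fun h => hx (h ▸ this)
          simp [this]
        rw [heq]
        simp [List.nodup_cons, hx, ih]

theorem alt_char (num : Int) : uniqueNumber_alt num = decide ((dL num).Nodup) := by
  unfold uniqueNumber_alt
  rw [collectDigits_eq]
  simp only [List.nil_append, PySem.Set.len]
  rw [Bool.eq_iff_iff]
  simp [Nat.cast_inj, ofList_len_eq_iff]

-- ===== VERDICT (by name: the statement is the Claim_ definition above) =====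
theorem uniqueNumber_spec : Claim_equal_uniqueNumber := by
  intro num _
  unfold Spec_uniqueNumber uniqueNumber
  rw [loopA_char, alt_char]
  simp [PySem.Dict.contains_empty]
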